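-- pv_equiv track=rewrite | github.com/jiwenc-nv/IsaacTeleop | src/core/cloudxr/python/env_config.py | _merge_env
-- ===== SOURCE A (Python) =====
-- def _merge_env(
--     defaults: dict[str, str | None], overrides: dict[str, str]
-- ) -> dict[str, str]:
--     """Merge overrides onto defaults; only string values are kept in output."""
--     out: dict[str, str] = {}
--     for k, v in defaults.items():
--         if v is not None and v != "":
--             out[k] = v
--     for k, v in overrides.items():
--         if v is not None:
--             out[k] = v
--     return out
-- ===== SOURCE B (Python) =====
-- def _merge_env(defaults, overrides):
--     """Merge overrides onto defaults; only string values are kept in output."""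
--     pending = dict(overrides)
--     out = {}
--     for k, v in defaults.items():
--         if v is not None and v != "":
--             out[k] = pending.pop(k, v)
--     out.update(pending)
--     return out
-- ===== Notes on version B (the rewrite author's own statement) =====
-- stated objective: alternative
-- what changed: B merges by destructively consuming a mutable copy of overrides: a single pass over defaults pops the matching override entry (pending.pop(k, v)) so each kept default immediately takes its final value, and the un-consumed overrides are then appended via dict.update; A never removes anything and instead overwrites in a second full pass over overrides.
import Mathlib
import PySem

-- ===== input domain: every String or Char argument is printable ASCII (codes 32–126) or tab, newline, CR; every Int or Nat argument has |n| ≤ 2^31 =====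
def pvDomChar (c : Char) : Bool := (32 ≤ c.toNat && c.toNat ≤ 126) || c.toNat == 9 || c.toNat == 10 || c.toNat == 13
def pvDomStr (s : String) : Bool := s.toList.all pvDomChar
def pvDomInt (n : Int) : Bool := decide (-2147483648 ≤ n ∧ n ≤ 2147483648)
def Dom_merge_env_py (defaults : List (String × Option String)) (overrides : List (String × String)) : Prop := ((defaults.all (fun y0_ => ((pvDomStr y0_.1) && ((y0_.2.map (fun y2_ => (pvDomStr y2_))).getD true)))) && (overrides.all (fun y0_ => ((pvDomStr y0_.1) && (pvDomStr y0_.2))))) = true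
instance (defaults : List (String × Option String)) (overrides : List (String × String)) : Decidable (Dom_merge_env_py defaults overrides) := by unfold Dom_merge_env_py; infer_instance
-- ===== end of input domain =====

-- B merges by destructively consuming a copy of overrides (pending.pop(k, v) inside one pass over
-- defaults, then appending the un-consumed overrides), instead of A's two-pass overwrite merge;
-- objective: alternative decomposition, same cost.

-- ===== PORT A =====
def merge_env_py (defaults : List (String × Option String)) (overrides : List (String × String)) : List (String × String) :=
  let out : PySem.Dict String String := PySem.Dict.empty
  let out := defaults.foldl (fun out kv =>
      match kv.2 with
      | some v => if v ≠ "" then out.insert kv.1 v else out  -- 'v is not None and v != ""'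
      | none => out) out
  -- 'if v is not None' in the second loop: v : str is never None, so the insert is unconditional
  let out := overrides.foldl (fun out kv => out.insert kv.1 kv.2) out
  out.items

-- ===== PORT B =====
-- the loop body of B's single pass: (out, pending), then 'out[k] = pending.pop(k, v)' for kept defaults
def pvStep (st : PySem.Dict String String × PySem.Dict String String)
    (kv : String × Option String) : PySem.Dict String String × PySem.Dict String String :=
  match kv.2 with
  | some v =>
    if v ≠ "" then
      match st.2.pop? kv.1 with
      | some wp => (st.1.insert kv.1 wp.1, wp.2)
      | none => (st.1.insert kv.1 v, st.2)
    else st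
  | none => st

def merge_env_py_alt (defaults : List (String × Option String)) (overrides : List (String × String)) : List (String × String) :=
  let pending : PySem.Dict String String := PySem.Dict.ofList overrides   -- pending = dict(overrides)
  let st := defaults.foldl pvStep ((PySem.Dict.empty : PySem.Dict String String), pending)
  (st.1.update st.2.items).items   -- out.update(pending); return out

-- ===== PRECONDITION & SPEC =====
-- Pre_ excludes association lists with duplicate keys: they do not correspond to any Python dict
-- (both parameters are dicts in Python), so neither program's behaviour there is specified.
def Pre_merge_env_py (defaults : List (String × Option String)) (overrides : List (String × String)) : Prop :=
  (defaults.map Prod.fst).Nodup ∧ (overrides.map Prod.fst).Nodup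
instance (defaults : List (String × Option String)) (overrides : List (String × String)) : Decidable (Pre_merge_env_py defaults overrides) := by unfold Pre_merge_env_py; infer_instance

def pvWitness_merge_env_py : (List (String × Option String)) × (List (String × String)) :=
  ([("A", some "1"), ("B", none), ("C", some "")], [("B", "2"), ("D", "")])

def Spec_merge_env_py (defaults : List (String × Option String)) (overrides : List (String × String)) (out : List (String × String)) : Prop := out = merge_env_py_alt defaults overrides
instance (defaults : List (String × Option String)) (overrides : List (String × String)) (out : List (String × String)) : Decidable (Spec_merge_env_py defaults overrides out) := by unfold Spec_merge_env_py; infer_instance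

-- ===== CLAIM (what is proved, stated in full; the proofs are below) =====
def Claim_equal_merge_env_py : Prop := ∀ (defaults : List (String × Option String)) (overrides : List (String × String)), Dom_merge_env_py defaults overrides → Pre_merge_env_py defaults overrides → Spec_merge_env_py defaults overrides (merge_env_py defaults overrides)

-- ===== LEMMAS AND PROOFS =====

-- the entry a defaults pair contributes (key, value) — the 'kept defaults' list
def pvFm (kv : String × Option String) : Option (String × String) :=
  match kv.2 with
  | some v => if v ≠ "" then some (kv.1, v) else none
  | none => none

-- A's conditional first loop is the unconditional insert loop over the filtered list
theorem pv_condInsert_eq (l : List (String × Option String)) (d : PySem.Dict String String) :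
    l.foldl (fun out kv =>
      match kv.2 with
      | some v => if v ≠ "" then out.insert kv.1 v else out
      | none => out) d
    = (l.filterMap pvFm).foldl (fun out kv => out.insert kv.1 kv.2) d := by
  induction l generalizing d with
  | nil => rfl
  | cons kv rest ih =>
    rcases kv with ⟨k, v⟩
    cases v with
    | none => simpa [pvFm] using ih d
    | some s =>
      by_cases hs : s = ""
      · simpa [pvFm, hs] using ih d
      · simpa [pvFm, hs] using ih (d.insert k s)

theorem pv_fst_filterMap_sublist (l : List (String × Option String)) :
    ((l.filterMap pvFm).map Prod.fst).Sublist (l.map Prod.fst) := by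
  induction l with
  | nil => simp
  | cons kv rest ih =>
    rcases kv with ⟨k, v⟩
    cases v with
    | none => simpa [pvFm] using ih.cons k
    | some s =>
      by_cases hs : s = ""
      · simpa [pvFm, hs] using ih.cons k
      · simpa [pvFm, hs] using ih.cons₂ k

-- the insert loop, characterised: update existing entries in place, append the fresh ones
theorem pv_insert_fold_items (ov : List (String × String)) (d : PySem.Dict String String)
    (hd : d.keys.Nodup) (ho : (ov.map Prod.fst).Nodup) :
    (ov.foldl (fun out kv => out.insert kv.1 kv.2) d).items =
      d.items.map (fun p =>
        match ov.find? (fun kv => kv.1 == p.1) with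
        | some kv => (p.1, kv.2)
        | none => p)
      ++ ov.filter (fun kv => !(d.contains kv.1)) := by
  induction ov generalizing d with
  | nil => simp
  | cons kv rest ih =>
    obtain ⟨k, v⟩ := kv
    simp only [List.map_cons, List.nodup_cons, List.mem_map] at ho
    have hknot : ∀ a ∈ rest, a.1 ≠ k := by
      intro a ha he
      exact ho.1 ⟨a, ha, he⟩
    have hrest : (rest.map Prod.fst).Nodup := ho.2
    have hkrest : rest.find? (fun q => q.1 == k) = none := by
      rw [List.find?_eq_none]
      intro x hx hb
      exact hknot x hx (by simpa using hb)
    simp only [List.foldl_cons]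
    by_cases hc : d.contains k
    · have hkeys : (d.insert k v).keys = d.keys := by
        simp only [PySem.Dict.keys, PySem.Dict.items_insert_of_contains d v hc, List.map_map]
        apply List.map_congr_left
        intro p hp
        by_cases h : p.1 = k <;> simp [Function.comp, h]
      have hck : ∀ x, (d.insert k v).contains x = d.contains x := by
        intro x
        have h1 : (d.insert k v).keys = d.keys := hkeys
        rw [PySem.Dict.contains_eq_decide_mem_keys, PySem.Dict.contains_eq_decide_mem_keys, h1]
      rw [ih (d.insert k v) (hkeys ▸ hd) hrest]
      rw [PySem.Dict.items_insert_of_contains d v hc, List.map_map]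
      congr 1
      · apply List.map_congr_left
        intro p hp
        by_cases hpk : p.1 = k
        · simp [Function.comp, hpk, hkrest]
        · have : (k == p.1) = false := beq_false_of_ne (fun h => hpk h.symm)
          simp [Function.comp, hpk, this]
      · rw [List.filter_cons]
        simp only [hc, Bool.not_true, Bool.false_eq_true, if_false]
        exact List.filter_congr (fun x _ => by rw [hck x.1])
    · have hcf : d.contains k = false := by simpa using hc
      have hkmem : k ∉ d.keys := by
        have := PySem.Dict.contains_eq_decide_mem_keys d k
        rw [hcf] at this
        exact of_decide_eq_false this.symm
      have hkeys' : (d.insert k v).keys.Nodup := by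
        simp only [PySem.Dict.keys, PySem.Dict.items_insert_of_not_contains d v hcf,
          List.map_append, List.map_cons, List.map_nil]
        exact List.Nodup.append (by simpa [PySem.Dict.keys] using hd) (by simp)
          (by simpa [List.disjoint_singleton, PySem.Dict.keys] using hkmem)
      have hck : ∀ x ∈ rest, (d.insert k v).contains x.1 = d.contains x.1 := by
        intro x hx
        have hxk : (k == x.1) = false := beq_false_of_ne fun h => hknot x hx h.symm
        simp [PySem.Dict.contains, PySem.Dict.items_insert_of_not_contains d v hcf,
          List.any_append, hxk]
      rw [ih (d.insert k v) hkeys' hrest]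
      rw [PySem.Dict.items_insert_of_not_contains d v hcf]
      rw [List.map_append, List.filter_cons]
      simp only [hcf, Bool.not_false, if_pos]
      have hmap : d.items.map (fun p =>
          match rest.find? (fun q => q.1 == p.1) with
          | some q => (p.1, q.2) | none => p) =
          d.items.map (fun p =>
          match ((k, v) :: rest).find? (fun q => q.1 == p.1) with
          | some q => (p.1, q.2) | none => p) := by
        apply List.map_congr_left
        intro p hp
        have hpk : p.1 ≠ k := by
          intro h
          apply hkmem
          simp only [PySem.Dict.keys]
          exact h ▸ List.mem_map_of_mem hp
        have : (k == p.1) = false := beq_false_of_ne fun h => hpk h.symm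
        simp [this]
      rw [← hmap]
      have hsing : ([(k, v)] : List (String × String)).map (fun p =>
          match rest.find? (fun q => q.1 == p.1) with
          | some q => (p.1, q.2) | none => p) = [(k, v)] := by
        simp [hkrest]
      rw [hsing]
      rw [List.filter_congr (fun x hx => by rw [hck x hx] :
        ∀ x ∈ rest, (!(d.insert k v).contains x.1) = (!(d.contains x.1)))]
      simp [List.append_assoc]

-- items of Dict.ofList under nodup keys
theorem pv_items_ofList {ν : Type} (l : List (String × ν)) (h : (l.map Prod.fst).Nodup) :
    (PySem.Dict.ofList l).items = l := by
  have := PySem.Dict.items_foldl_insert_fresh l Prod.fst Prod.snd PySem.Dict.empty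
    (by intro a _; simp [PySem.Dict.contains, PySem.Dict.empty]) h
  simpa [PySem.Dict.ofList, PySem.Dict.update, PySem.Dict.empty] using this

-- find? over a filter that removes only key k is find? itself, for a different key
theorem pv_find?_filter_ne {ν : Type} (l : List (String × ν)) (k k' : String) (h : k' ≠ k) :
    (l.filter (fun p => !(p.1 == k))).find? (fun p => p.1 == k') = l.find? (fun p => p.1 == k') := by
  induction l with
  | nil => rfl
  | cons p rest ih =>
    by_cases hp : p.1 = k
    · have hk : (p.1 == k) = true := beq_iff_eq.mpr hp
      have hk' : (p.1 == k') = false := beq_false_of_ne (by rw [hp]; exact fun he => h he.symm)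
      simp [hk, hk', ih]
    · have hk : (p.1 == k) = false := beq_false_of_ne hp
      simp only [List.filter_cons, hk, Bool.not_false, if_pos, List.find?_cons]
      cases hq : (p.1 == k') <;> simp [ih]

theorem pv_getD_erase_of_ne (d : PySem.Dict String String) (k k' : String) (dv : String)
    (h : k' ≠ k) : (d.erase k).getD k' dv = d.getD k' dv := by
  simp [PySem.Dict.getD, PySem.Dict.get?, PySem.Dict.erase, pv_find?_filter_ne d.items k k' h]

-- THE INVARIANT of B's single pass: starting from (out, pend), the pass appends the kept defaults
-- to out (each valued by a lookup in the ORIGINAL pend) and removes exactly the kept keys from pend.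
theorem pvB_fold_items (l : List (String × Option String))
    (out pend : PySem.Dict String String)
    (hl : (l.map Prod.fst).Nodup)
    (hout : ∀ x ∈ l.map Prod.fst, out.contains x = false) :
    (l.foldl pvStep (out, pend)).1.items
      = out.items ++ (l.filterMap pvFm).map (fun q => (q.1, pend.getD q.1 q.2)) ∧
    (l.foldl pvStep (out, pend)).2.items
      = pend.items.filter (fun kv => !(decide (kv.1 ∈ (l.filterMap pvFm).map Prod.fst))) := by
  induction l generalizing out pend with
  | nil => simp
  | cons kv rest ih =>
    obtain ⟨k, vo⟩ := kv
    simp only [List.map_cons, List.nodup_cons] at hl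
    have hknotrest : k ∉ rest.map Prod.fst := hl.1
    have hrest : (rest.map Prod.fst).Nodup := hl.2
    have houtk : out.contains k = false := hout k (by simp)
    have houtrest : ∀ x ∈ rest.map Prod.fst, out.contains x = false := by
      intro x hx; exact hout x (by simp [hx])
    cases vo with
    | none =>
      have hfm : List.filterMap pvFm ((k, (none : Option String)) :: rest)
          = List.filterMap pvFm rest := by simp [pvFm]
      have hstep : ((k, (none : Option String)) :: rest).foldl pvStep (out, pend)
          = rest.foldl pvStep (out, pend) := by simp [pvStep]
      rw [hstep, hfm]
      exact ih out pend hrest houtrest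
    | some v =>
      by_cases hv : v = ""
      · have hfm : List.filterMap pvFm ((k, some v) :: rest)
            = List.filterMap pvFm rest := by simp [pvFm, hv]
        have hstep : ((k, some v) :: rest).foldl pvStep (out, pend)
            = rest.foldl pvStep (out, pend) := by simp [pvStep, hv]
        rw [hstep, hfm]
        exact ih out pend hrest houtrest
      · have hfm : List.filterMap pvFm ((k, some v) :: rest)
            = (k, v) :: List.filterMap pvFm rest := by simp [pvFm, hv]
        have hinsrest : ∀ (w : String) (x : String), x ∈ rest.map Prod.fst →
            (out.insert k w).contains x = false := by
          intro w x hx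
          have hxk : (x == k) = false :=
            beq_false_of_ne (fun he => hknotrest (he ▸ hx))
          rw [PySem.Dict.contains_insert]
          simp [hxk, houtrest x hx]
        have hins_items : ∀ w : String, (out.insert k w).items = out.items ++ [(k, w)] :=
          fun w => PySem.Dict.items_insert_of_not_contains out w houtk
        cases hget : pend.get? k with
        | none =>
          have hnok : ∀ p ∈ pend.items, (p.1 == k) = false := by
            intro p hp
            have hfind : pend.items.find? (fun q => q.1 == k) = none := by
              have h0 := hget
              simp only [PySem.Dict.get?] at h0
              exact Option.map_eq_none_iff.mp h0
            simpa using List.find?_eq_none.mp hfind p hp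
          have hstep : ((k, some v) :: rest).foldl pvStep (out, pend)
              = rest.foldl pvStep ((out.insert k v), pend) := by
            simp [pvStep, hv, PySem.Dict.pop?, hget]
          have hIH := ih (out.insert k v) pend hrest (hinsrest v)
          have hhd : pend.getD k v = v := PySem.Dict.getD_of_get?_eq_none pend v hget
          constructor
          · rw [hstep, hIH.1, hins_items v, hfm]
            simp [hhd, List.append_assoc]
          · rw [hstep, hIH.2, hfm]
            apply List.filter_congr
            intro p hp
            have hpk : p.1 ≠ k := fun he => by
              have h0 := hnok p hp; rw [he] at h0; simp at h0
            simp [hpk]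
        | some w =>
          have hstep : ((k, some v) :: rest).foldl pvStep (out, pend)
              = rest.foldl pvStep ((out.insert k w), pend.erase k) := by
            simp [pvStep, hv, PySem.Dict.pop?, hget]
          have hIH := ih (out.insert k w) (pend.erase k) hrest (hinsrest w)
          have hhd : pend.getD k v = w := PySem.Dict.getD_of_get?_eq_some pend v hget
          constructor
          · rw [hstep, hIH.1, hins_items w, hfm]
            have hmapeq : (rest.filterMap pvFm).map
                (fun q => (q.1, (pend.erase k).getD q.1 q.2)) =
                (rest.filterMap pvFm).map (fun q => (q.1, pend.getD q.1 q.2)) := by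
              apply List.map_congr_left
              intro q hq
              have hqmem : q.1 ∈ rest.map Prod.fst :=
                (pv_fst_filterMap_sublist rest).mem (List.mem_map_of_mem hq)
              have hqk : q.1 ≠ k := fun he => hknotrest (he ▸ hqmem)
              rw [pv_getD_erase_of_ne pend k q.1 q.2 hqk]
            rw [hmapeq]
            simp [hhd, List.append_assoc]
          · rw [hstep, hIH.2, hfm]
            show ((pend.erase k).items.filter _) = _
            simp only [PySem.Dict.erase]
            rw [List.filter_filter]
            apply List.filter_congr
            intro p hp
            by_cases hpk : p.1 = k
            · simp [hpk]
            · have hne : (p.1 == k) = false := beq_false_of_ne hpk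
              simp [hpk, hne]

-- ===== VERDICT (by name: the statement is the Claim_ definition above) =====
theorem merge_env_py_spec : Claim_equal_merge_env_py := by
  intro defaults overrides _ hpre
  obtain ⟨hd, ho⟩ := hpre
  simp only [Spec_merge_env_py, merge_env_py, merge_env_py_alt]
  rw [pv_condInsert_eq]
  set L : List (String × String) := defaults.filterMap pvFm with hL
  have hLk : (L.map Prod.fst).Nodup := (pv_fst_filterMap_sublist defaults).nodup hd
  -- A's side: the canonical form
  have h1 : (L.foldl (fun out kv => out.insert kv.1 kv.2) PySem.Dict.empty).items = L := by
    rw [pv_insert_fold_items L PySem.Dict.empty (by simp [PySem.Dict.keys, PySem.Dict.empty]) hLk]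
    simp [PySem.Dict.empty, PySem.Dict.contains]
  set d1 := L.foldl (fun out kv => out.insert kv.1 kv.2) PySem.Dict.empty with hd1
  have hd1k : d1.keys.Nodup := by simpa [PySem.Dict.keys, h1] using hLk
  rw [pv_insert_fold_items overrides d1 hd1k ho, h1]
  -- B's side: run the invariant
  have hodi : (PySem.Dict.ofList overrides).items = overrides := pv_items_ofList overrides ho
  obtain ⟨hBout, hBpend⟩ := pvB_fold_items defaults PySem.Dict.empty
    (PySem.Dict.ofList overrides) hd
    (by intro x _; simp [PySem.Dict.contains, PySem.Dict.empty])
  set stB := defaults.foldl pvStep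
    ((PySem.Dict.empty : PySem.Dict String String), PySem.Dict.ofList overrides) with hstB
  rw [show (PySem.Dict.empty : PySem.Dict String String).items = [] from rfl] at hBout
  rw [List.nil_append, ← hL] at hBout
  rw [hodi, ← hL] at hBpend
  -- the final update appends: out's keys (kept defaults) are disjoint from pending's keys
  have hfreshB : ∀ a ∈ stB.2.items, stB.1.contains a.1 = false := by
    intro a ha
    rw [hBpend] at ha
    have hnot : a.1 ∉ L.map Prod.fst := by
      have := List.of_mem_filter ha
      simpa using this
    simp only [PySem.Dict.contains, hBout]
    rw [List.any_eq_false]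
    intro p hp
    rcases List.mem_map.mp hp with ⟨q, hq, hqe⟩
    subst hqe
    simp only [Bool.not_eq_true]
    exact beq_false_of_ne fun he => hnot (he ▸ List.mem_map_of_mem hq)
  have hpendk : (stB.2.items.map Prod.fst).Nodup := by
    rw [hBpend]
    exact (List.filter_sublist.map Prod.fst).nodup ho
  have hupd : (stB.1.update stB.2.items).items = stB.1.items ++ stB.2.items := by
    have := PySem.Dict.items_foldl_insert_fresh stB.2.items Prod.fst Prod.snd stB.1
      hfreshB hpendk
    simpa [PySem.Dict.update] using this
  rw [hupd, hBout, hBpend]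
  -- compare the two segments
  congr 1
  · apply List.map_congr_left
    intro p hp
    have hget : (PySem.Dict.ofList overrides).getD p.1 p.2 =
        ((overrides.find? (fun q => q.1 == p.1)).map Prod.snd).getD p.2 := by
      simp [PySem.Dict.getD, PySem.Dict.get?, hodi]
    cases hfind : overrides.find? (fun q => q.1 == p.1) with
    | some q => simp [hget, hfind]
    | none => simp [hget, hfind]
  · apply List.filter_congr
    intro kv _
    have : d1.contains kv.1 = decide (kv.1 ∈ L.map Prod.fst) := by
      simp only [PySem.Dict.contains, h1]
      rw [Bool.eq_iff_iff]
      simp only [List.any_eq_true, decide_eq_true_eq, List.mem_map, beq_iff_eq]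
    rw [this]
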